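-- pv_equiv track=rewrite | github.com/Shubhamgadekar2004/Equip-9 | Optimal Equipment Deal Matching.py | match_requests_with_sellers
-- ===== SOURCE A (Python) =====
-- def match_requests_with_sellers(requests, sellers):
--     seller_dict = {}
--     for equip, price in sellers:
--         if equip not in seller_dict or price < seller_dict[equip]:
--             seller_dict[equip] = price
--     results = []
--     for equip, max_price in requests:
--         if equip in seller_dict and seller_dict[equip] <= max_price:
--             results.append(seller_dict[equip])
--         else:
--             results.append(None)
--     return results
-- ===== SOURCE B (Python) =====
-- def match_requests_with_sellers(requests, sellers):
--     def cheapest(equip, max_price):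
--         affordable = [price for e, price in sellers if e == equip and price <= max_price]
--         return min(affordable) if affordable else None
--     return [cheapest(e, m) for e, m in requests]
-- ===== Notes on version B (the rewrite author's own statement) =====
-- stated objective: alternative
-- what changed: Replaces A's precomputed min-price dictionary and per-request O(1) lookups with a per-request list comprehension that filters affordable matching prices and takes min() of them (none kept if the list is empty), no dictionary and no running-best loop.
import Mathlib
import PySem

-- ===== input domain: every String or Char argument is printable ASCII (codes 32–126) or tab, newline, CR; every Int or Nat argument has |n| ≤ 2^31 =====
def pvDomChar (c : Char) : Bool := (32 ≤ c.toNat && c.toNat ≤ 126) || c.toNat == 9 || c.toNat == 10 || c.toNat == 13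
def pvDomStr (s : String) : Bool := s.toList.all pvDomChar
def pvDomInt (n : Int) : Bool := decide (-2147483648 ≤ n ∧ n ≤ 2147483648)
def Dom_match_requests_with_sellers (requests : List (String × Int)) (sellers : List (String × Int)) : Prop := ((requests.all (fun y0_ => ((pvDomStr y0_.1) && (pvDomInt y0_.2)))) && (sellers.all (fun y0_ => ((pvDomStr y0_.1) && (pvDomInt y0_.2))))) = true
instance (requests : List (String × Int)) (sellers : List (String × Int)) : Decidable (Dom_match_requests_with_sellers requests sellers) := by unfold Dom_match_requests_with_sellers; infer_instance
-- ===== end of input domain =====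

-- B drops A's precomputed min-price dictionary: per request it filters the affordable
-- matching prices with a comprehension and takes min() of them (alternative decomposition, not claimed faster).


-- ===== PORT A =====
-- for equip, price in sellers: if equip not in seller_dict or price < seller_dict[equip]: seller_dict[equip] = price
def pvBuildSellerDict (sellers : List (String × Int)) : PySem.Dict String Int :=
  sellers.foldl
    (fun d p =>
      if (!d.contains p.1) || (match d.get? p.1 with | none => true | some v => decide (p.2 < v)) then
        d.insert p.1 p.2
      else d)
    PySem.Dict.empty

def match_requests_with_sellers (requests : List (String × Int)) (sellers : List (String × Int)) : List (Option Int) :=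
  let seller_dict := pvBuildSellerDict sellers
  requests.foldl
    (fun results q =>
      results ++
        [if seller_dict.contains q.1 && (match seller_dict.get? q.1 with | some v => decide (v ≤ q.2) | none => false) then
            seller_dict.get? q.1
         else none])
    []

-- ===== PORT B =====
-- affordable = [price for e, price in sellers if e == equip and price <= max_price]; min(affordable) if affordable else None
def pvCheapest (sellers : List (String × Int)) (equip : String) (maxPrice : Int) : Option Int :=
  let affordable := (sellers.filter (fun s => s.1 == equip && decide (s.2 ≤ maxPrice))).map Prod.snd
  PySem.List.min? affordable (fun x => x)

def match_requests_with_sellers_alt (requests : List (String × Int)) (sellers : List (String × Int)) : List (Option Int) :=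
  requests.map (fun q => pvCheapest sellers q.1 q.2)

-- ===== PRECONDITION & SPEC =====
def Spec_match_requests_with_sellers (requests : List (String × Int)) (sellers : List (String × Int)) (out : List (Option Int)) : Prop := out = match_requests_with_sellers_alt requests sellers
instance (requests : List (String × Int)) (sellers : List (String × Int)) (out : List (Option Int)) : Decidable (Spec_match_requests_with_sellers requests sellers out) := by unfold Spec_match_requests_with_sellers; infer_instance

-- ===== CLAIM (what is proved, stated in full; the proofs are below) =====
def Claim_equal_match_requests_with_sellers : Prop := ∀ (requests : List (String × Int)) (sellers : List (String × Int)), Dom_match_requests_with_sellers requests sellers → Spec_match_requests_with_sellers requests sellers (match_requests_with_sellers requests sellers)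

-- ===== LEMMAS AND PROOFS =====

-- proof-side helper: A's running-min loop over the sellers that match one key
def pvScanBest (sellers : List (String × Int)) (equip : String) : Option Int :=
  sellers.foldl
    (fun best s =>
      if s.1 == equip && (match best with | none => true | some b => decide (s.2 < b)) then
        some s.2
      else best)
    none

-- the dict built by A answers each lookup with the running-min scan result
theorem pv_get_eq_scan (sellers : List (String × Int)) (e : String) :
    (pvBuildSellerDict sellers).get? e = pvScanBest sellers e := by
  unfold pvBuildSellerDict pvScanBest
  suffices h : ∀ (d : PySem.Dict String Int) (b : Option Int), d.get? e = b →
      (sellers.foldl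
        (fun d p =>
          if (!d.contains p.1) || (match d.get? p.1 with | none => true | some v => decide (p.2 < v)) then
            d.insert p.1 p.2
          else d) d).get? e =
      sellers.foldl
        (fun best s =>
          if s.1 == e && (match best with | none => true | some b => decide (s.2 < b)) then
            some s.2
          else best) b by
    exact h _ _ (by simp [PySem.Dict.get?_empty])
  induction sellers with
  | nil => intro d b hb; simpa using hb
  | cons s rest ih =>
    intro d b hb
    simp only [List.foldl_cons]
    apply ih
    by_cases hk : s.1 = e
    · subst hk
      rw [hb]
      have hc : d.contains s.1 = (d.get? s.1).isSome := PySem.Dict.contains_eq_isSome_get? d s.1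
      cases b with
      | none =>
        simp [hc, hb, PySem.Dict.get?_insert_self]
      | some v =>
        simp only [hc, hb, Option.isSome_some, Bool.not_true, Bool.false_or, beq_self_eq_true,
          Bool.true_and]
        by_cases hlt : s.2 < v
        · simp [hlt, PySem.Dict.get?_insert_self]
        · simp [hlt, hb]
    · have hbeq : (s.1 == e) = false := by simp [hk]
      simp only [hbeq, Bool.false_and, Bool.false_eq_true, if_false]
      split_ifs with hi
      · rw [PySem.Dict.get?_insert_of_ne d s.2 (Ne.symm hk)]; exact hb
      · exact hb

-- the scan over sellers is the running-min loop over the matching prices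
theorem pv_scan_eq_foldl (sellers : List (String × Int)) (e : String) :
    ∀ b : Option Int,
      sellers.foldl
        (fun best s =>
          if s.1 == e && (match best with | none => true | some b => decide (s.2 < b)) then
            some s.2
          else best) b =
      ((sellers.filter (fun s => s.1 == e)).map Prod.snd).foldl
        (fun best p =>
          if (match best with | none => true | some b => decide (p < b)) then some p else best) b := by
  induction sellers with
  | nil => intro b; rfl
  | cons s rest ih =>
    intro b
    by_cases hk : s.1 = e
    · simp only [List.foldl_cons, List.filter_cons, hk, beq_self_eq_true, Bool.true_and,
        if_true, List.map_cons]
      exact ih _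
    · have hbeq : (s.1 == e) = false := by simp [hk]
      simp only [List.foldl_cons, List.filter_cons, hbeq, Bool.false_and, Bool.false_eq_true,
        if_false]
      exact ih b

-- the running-min loop is min? on Int lists
theorem pv_foldl_min_some (t : List Int) :
    ∀ b : Int,
      t.foldl (fun best p =>
          if (match best with | none => true | some b => decide (p < b)) then some p else best)
        (some b) = some (t.foldl min b) := by
  induction t with
  | nil => intro b; rfl
  | cons p t ih =>
    intro b
    simp only [List.foldl_cons]
    by_cases h : p < b
    · rw [if_pos (by simp [h]), ih, min_eq_right h.le]
    · rw [if_neg (by simp [h]), ih, min_eq_left (by omega)]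

theorem pv_scan_eq_min? (sellers : List (String × Int)) (e : String) :
    pvScanBest sellers e =
      PySem.List.min? ((sellers.filter (fun s => s.1 == e)).map Prod.snd) (fun x => x) := by
  unfold pvScanBest
  rw [pv_scan_eq_foldl]
  cases hM : (sellers.filter (fun s => s.1 == e)).map Prod.snd with
  | nil => simp [PySem.List.min?]
  | cons p t =>
    rw [PySem.List.min?_id_cons]
    simpa using pv_foldl_min_some t p

-- the affordable list is the matching list filtered by the threshold
theorem pv_affordable_eq (sellers : List (String × Int)) (e : String) (m : Int) :
    (sellers.filter (fun s => s.1 == e && decide (s.2 ≤ m))).map Prod.snd =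
      ((sellers.filter (fun s => s.1 == e)).map Prod.snd).filter (fun p => decide (p ≤ m)) := by
  induction sellers with
  | nil => rfl
  | cons s rest ih =>
    by_cases hk : s.1 = e
    · by_cases hm : s.2 ≤ m <;>
        simp [hk, hm, ih]
    · simp [hk, ih]

-- thresholding min(M) is min of the thresholded list
theorem pv_min_filter (M : List Int) (m : Int) :
    PySem.List.min? (M.filter (fun p => decide (p ≤ m))) (fun x => x) =
      (match PySem.List.min? M (fun x => x) with
       | some b => if b ≤ m then some b else none
       | none => none) := by
  cases hM : PySem.List.min? M (fun x => x) with
  | none =>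
    have : M = [] := (PySem.List.min?_eq_none_iff _ _).mp hM
    subst this; rfl
  | some b =>
    have hmem : b ∈ M := PySem.List.min?_mem hM
    have hmin : ∀ y ∈ M, b ≤ y := fun y hy => PySem.List.min?_isMin hM y hy
    by_cases hb : b ≤ m
    · have hbf : b ∈ M.filter (fun p => decide (p ≤ m)) := by
        simp [List.mem_filter, hmem, hb]
      cases hF : PySem.List.min? (M.filter (fun p => decide (p ≤ m))) (fun x => x) with
      | none =>
        have : M.filter (fun p => decide (p ≤ m)) = [] := (PySem.List.min?_eq_none_iff _ _).mp hF
        rw [this] at hbf; simp at hbf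
      | some x =>
        have hxmem : x ∈ M.filter (fun p => decide (p ≤ m)) := PySem.List.min?_mem hF
        have hxM : x ∈ M := (List.mem_filter.mp hxmem).1
        have h1 : b ≤ x := hmin x hxM
        have h2 : x ≤ b := PySem.List.min?_isMin hF b hbf
        simp only [hb, if_true]
        congr 1
        omega
    · have hF : M.filter (fun p => decide (p ≤ m)) = [] := by
        apply List.filter_eq_nil_iff.mpr
        intro p hp
        have := hmin p hp
        simp only [decide_eq_true_eq]
        omega
      rw [hF]
      simp [hb, PySem.List.min?]
  
-- per-request agreement
theorem pv_request_eq (sellers : List (String × Int)) (e : String) (m : Int) :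
    (if (pvBuildSellerDict sellers).contains e &&
        (match (pvBuildSellerDict sellers).get? e with | some v => decide (v ≤ m) | none => false) then
        (pvBuildSellerDict sellers).get? e
     else none) = pvCheapest sellers e m := by
  unfold pvCheapest
  rw [pv_affordable_eq, pv_min_filter]
  have hg : (pvBuildSellerDict sellers).get? e =
      PySem.List.min? ((sellers.filter (fun s => s.1 == e)).map Prod.snd) (fun x => x) :=
    (pv_get_eq_scan sellers e).trans (pv_scan_eq_min? sellers e)
  have hc : (pvBuildSellerDict sellers).contains e = ((pvBuildSellerDict sellers).get? e).isSome :=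
    PySem.Dict.contains_eq_isSome_get? _ e
  cases hv : (pvBuildSellerDict sellers).get? e with
  | none =>
    rw [hv] at hc
    rw [← hg, hv]
    simp [hc]
  | some b =>
    rw [hv] at hc
    rw [← hg, hv]
    by_cases hle : b ≤ m <;> simp [hc, hle]

theorem match_requests_with_sellers_eq (requests sellers : List (String × Int)) :
    match_requests_with_sellers requests sellers = match_requests_with_sellers_alt requests sellers := by
  unfold match_requests_with_sellers match_requests_with_sellers_alt
  suffices h : ∀ acc : List (Option Int),
      requests.foldl
        (fun results q =>
          results ++
            [if (pvBuildSellerDict sellers).contains q.1 &&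
                (match (pvBuildSellerDict sellers).get? q.1 with | some v => decide (v ≤ q.2) | none => false) then
                (pvBuildSellerDict sellers).get? q.1
             else none])
        acc = acc ++ requests.map (fun q => pvCheapest sellers q.1 q.2) by
    simpa using h []
  induction requests with
  | nil => intro acc; simp
  | cons q rest ih =>
    intro acc
    simp only [List.foldl_cons, List.map_cons]
    rw [ih, pv_request_eq]
    simp

-- ===== VERDICT (by name: the statement is the Claim_ definition above) =====
theorem match_requests_with_sellers_spec : Claim_equal_match_requests_with_sellers := by
  intro requests sellers _
  exact match_requests_with_sellers_eq requests sellers
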